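-- pv_equiv track=rewrite | github.com/jsatt/advent | 2020/d12/p1.py | walk_actions
-- ===== SOURCE A (Python) =====
-- from collections import deque
--
-- def move_boat(location, direction, val):
--     if direction == 'N':
--         location[0] += val
--     elif direction == 'S':
--         location[0] -= val
--     elif direction == 'E':
--         location[1] += val
--     elif direction == 'W':
--         location[1] -= val
--
-- def walk_actions(actions):
--     location = [0, 0]
--     direction = deque(['E', 'S', 'W', 'N'])
--     for action, val in actions:
--         if action in ['N', 'E', 'S', 'W']:
--             move_boat(location, action, val)
--         elif action == 'F':
--             move_boat(location, direction[0], val)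
--         elif action == 'R':
--             turns = val // 90
--             direction.rotate(-turns)
--         elif action == 'L':
--             turns = val // 90
--             direction.rotate(turns)
--     return location
-- ===== SOURCE B (Python) =====
-- def walk_actions(actions):
--     # Pass 1: quarter-turn delta contributed by each action.
--     deltas = [(v // 90 if a == 'R' else -(v // 90) if a == 'L' else 0)
--               for a, v in actions]
--     # Pass 2: heading index (0=E,1=S,2=W,3=N) in effect at each action = prefix sum mod 4.
--     headings = []
--     h = 0
--     for d in deltas:
--         headings.append(h % 4)
--         h += d
--     # Pass 3: per-action displacement vector; position = sum of independent contributions.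
--     vec = {'N': (1, 0), 'S': (-1, 0), 'E': (0, 1), 'W': (0, -1)}
--     fvec = [(0, 1), (-1, 0), (0, -1), (1, 0)]
--     moves = [vec[a] if a in vec else fvec[k] if a == 'F' else (0, 0)
--              for (a, v), k in zip(actions, headings)]
--     r = sum(m[0] * v for m, (a, v) in zip(moves, actions))
--     c = sum(m[1] * v for m, (a, v) in zip(moves, actions))
--     return [r, c]
-- ===== Notes on version B (the rewrite author's own statement) =====
-- stated objective: alternative
-- what changed: Replaces A's single-pass state-machine simulation (mutated location list plus a rotated deque of compass letters) with a staged pipeline: map actions to quarter-turn deltas, prefix-sum them mod 4 to get the heading in effect at each action, map each action to an independent displacement vector, and return the componentwise sums of those vectors.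
import Mathlib
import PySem

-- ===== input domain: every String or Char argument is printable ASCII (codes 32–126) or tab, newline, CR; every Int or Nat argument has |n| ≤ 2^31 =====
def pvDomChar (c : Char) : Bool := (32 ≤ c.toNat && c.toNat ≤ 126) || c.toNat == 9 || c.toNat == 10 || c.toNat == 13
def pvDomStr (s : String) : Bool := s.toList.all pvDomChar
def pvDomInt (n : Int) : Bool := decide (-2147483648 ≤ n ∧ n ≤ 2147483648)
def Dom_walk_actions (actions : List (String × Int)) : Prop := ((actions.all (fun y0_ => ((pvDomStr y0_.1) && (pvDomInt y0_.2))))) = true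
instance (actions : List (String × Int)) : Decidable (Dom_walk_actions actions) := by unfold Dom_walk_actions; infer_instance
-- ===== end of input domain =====

-- B replaces the sequential deque-of-letters simulation by a staged pipeline: turn deltas, prefix-sum headings, per-action displacement vectors, componentwise sum (alternative decomposition, same cost).

-- ===== PORT A =====
-- move_boat mutates `location` in place; ported as returning the updated 2-element list.
def move_boat (location : List Int) (direction : String) (val : Int) : List Int :=
  if direction = "N" then location.set 0 (location.getD 0 0 + val)
  else if direction = "S" then location.set 0 (location.getD 0 0 - val)
  else if direction = "E" then location.set 1 (location.getD 1 0 + val)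
  else if direction = "W" then location.set 1 (location.getD 1 0 - val)
  else location

-- deque.rotate n (rotate right by n, any sign) = rotate left by (-n) mod len; exact for nonempty deques.
def dequeRotate (l : List String) (n : Int) : List String :=
  if l.isEmpty then l
  else
    let k := (PySem.Int.mod (-n) (l.length : Int)).toNat
    l.drop k ++ l.take k

def walkA (location : List Int) (dq : List String) : List (String × Int) → List Int
  | [] => location
  | (action, val) :: rest =>
    if action = "N" ∨ action = "E" ∨ action = "S" ∨ action = "W" then
      walkA (move_boat location action val) dq rest
    else if action = "F" then
      walkA (move_boat location (dq.headD "") val) dq rest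
    else if action = "R" then
      walkA location (dequeRotate dq (-(PySem.Int.floordiv val 90))) rest
    else if action = "L" then
      walkA location (dequeRotate dq (PySem.Int.floordiv val 90)) rest
    else walkA location dq rest

def walk_actions (actions : List (String × Int)) : List Int :=
  walkA [0, 0] ["E", "S", "W", "N"] actions

-- ===== PORT B =====
-- quarter-turn delta of one action (pass 1's per-element map)
def turnDelta (p : String × Int) : Int :=
  if p.1 = "R" then PySem.Int.floordiv p.2 90
  else if p.1 = "L" then -(PySem.Int.floordiv p.2 90) else 0

-- pass 2: the loop appending h % 4 then h += d
def hdgs (h : Int) : List Int → List Int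
  | [] => []
  | d :: ds => PySem.Int.mod h 4 :: hdgs (h + d) ds

-- fvec[k] for k in 0..3 (0=E,1=S,2=W,3=N)
def fvec (k : Int) : Int × Int :=
  if k = 0 then (0, 1) else if k = 1 then (-1, 0)
  else if k = 2 then (0, -1) else (1, 0)

-- vec[a] if a in vec else fvec[k] if a == 'F' else (0, 0)
def moveOf (p : String × Int) (k : Int) : Int × Int :=
  if p.1 = "N" then (1, 0) else if p.1 = "S" then (-1, 0)
  else if p.1 = "E" then (0, 1) else if p.1 = "W" then (0, -1)
  else if p.1 = "F" then fvec k else (0, 0)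

def walk_actions_alt (actions : List (String × Int)) : List Int :=
  let deltas := actions.map turnDelta
  let headings := hdgs 0 deltas
  let moves := (actions.zip headings).map (fun q => moveOf q.1 q.2)
  let r := ((moves.zip actions).map (fun q => q.1.1 * q.2.2)).sum
  let c := ((moves.zip actions).map (fun q => q.1.2 * q.2.2)).sum
  [r, c]

-- ===== PRECONDITION & SPEC =====
def Spec_walk_actions (actions : List (String × Int)) (out : List Int) : Prop := out = walk_actions_alt actions
instance (actions : List (String × Int)) (out : List Int) : Decidable (Spec_walk_actions actions out) := by unfold Spec_walk_actions; infer_instance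

-- ===== CLAIM (what is proved, stated in full; the proofs are below) =====
def Claim_equal_walk_actions : Prop := ∀ (actions : List (String × Int)), Dom_walk_actions actions → Spec_walk_actions actions (walk_actions actions)

-- ===== LEMMAS AND PROOFS =====
-- Reference recursive sums corresponding to B's pipeline started at heading h.
def rsumFrom (h : Int) : List (String × Int) → Int
  | [] => 0
  | p :: rest => (moveOf p (PySem.Int.mod h 4)).1 * p.2 + rsumFrom (h + turnDelta p) rest

def csumFrom (h : Int) : List (String × Int) → Int
  | [] => 0
  | p :: rest => (moveOf p (PySem.Int.mod h 4)).2 * p.2 + csumFrom (h + turnDelta p) rest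

theorem pipe_r (acts : List (String × Int)) : ∀ h : Int,
    ((((acts.zip (hdgs h (acts.map turnDelta))).map (fun q => moveOf q.1 q.2)).zip acts).map
      (fun q => q.1.1 * q.2.2)).sum = rsumFrom h acts := by
  induction acts with
  | nil => intro h; simp [rsumFrom]
  | cons p rest ih => intro h; simp [hdgs, rsumFrom, ih]

theorem pipe_c (acts : List (String × Int)) : ∀ h : Int,
    ((((acts.zip (hdgs h (acts.map turnDelta))).map (fun q => moveOf q.1 q.2)).zip acts).map
      (fun q => q.1.2 * q.2.2)).sum = csumFrom h acts := by
  induction acts with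
  | nil => intro h; simp [csumFrom]
  | cons p rest ih => intro h; simp [hdgs, csumFrom, ih]

-- deque after k quarter-turns clockwise
def deqOf : Nat → List String
  | 0 => ["E", "S", "W", "N"]
  | 1 => ["S", "W", "N", "E"]
  | 2 => ["W", "N", "E", "S"]
  | _ => ["N", "E", "S", "W"]

theorem rotLeft_deqOf (k m : Nat) (hk : k < 4) (hm : m < 4) :
    (deqOf k).drop m ++ (deqOf k).take m = deqOf ((k + m) % 4) := by
  interval_cases k <;> interval_cases m <;> decide

theorem dequeRotate_deqOf (k : Nat) (n : Int) (hk : k < 4) :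
    dequeRotate (deqOf k) n = deqOf ((k + ((-n) % 4).toNat) % 4) := by
  have hlen : (deqOf k).length = 4 := by interval_cases k <;> decide
  have hne : (deqOf k).isEmpty = false := by interval_cases k <;> decide
  have hmod : PySem.Int.mod (-n) 4 = (-n) % 4 :=
    PySem.Int.mod_eq_emod_of_pos (by norm_num)
  have hm : ((-n) % 4).toNat < 4 := by omega
  simp only [dequeRotate, hne, hlen, Bool.false_eq_true, if_false]
  norm_num [hmod]
  exact rotLeft_deqOf k _ hk hm

theorem walkA_eq_sums (acts : List (String × Int)) :
    ∀ (a b h : Int) (k : Nat), k = (PySem.Int.mod h 4).toNat →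
      walkA [a, b] (deqOf k) acts = [a + rsumFrom h acts, b + csumFrom h acts] := by
  induction acts with
  | nil => intro a b h k hkh; simp [walkA, rsumFrom, csumFrom]
  | cons p rest ih =>
    obtain ⟨action, val⟩ := p
    intro a b h k hkh
    have hmod : ∀ x : Int, PySem.Int.mod x 4 = x % 4 := fun x =>
      PySem.Int.mod_eq_emod_of_pos (by norm_num)
    have hk4 : k < 4 := by rw [hmod] at hkh; omega
    by_cases hN : action = "N"
    · subst hN
      simp only [walkA, move_boat, reduceIte, String.reduceEq, or_false, if_true]
      simp only [rsumFrom, csumFrom, moveOf, turnDelta, reduceIte, String.reduceEq, add_zero]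
      have := ih (a + val) b h k hkh
      simp at this ⊢; rw [this]; ring_nf
    · by_cases hS : action = "S"
      · subst hS
        simp only [walkA, move_boat, reduceIte, String.reduceEq, or_true, or_false, if_true]
        simp only [rsumFrom, csumFrom, moveOf, turnDelta, reduceIte, String.reduceEq, add_zero]
        have := ih (a - val) b h k hkh
        simp at this ⊢; rw [this]; ring_nf
      · by_cases hE : action = "E"
        · subst hE
          simp only [walkA, move_boat, reduceIte, String.reduceEq, or_true, or_false, if_true]
          simp only [rsumFrom, csumFrom, moveOf, turnDelta, reduceIte, String.reduceEq, add_zero]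
          have := ih a (b + val) h k hkh
          simp at this ⊢; rw [this]; ring_nf
        · by_cases hW : action = "W"
          · subst hW
            simp only [walkA, move_boat, reduceIte, String.reduceEq, or_true, if_true]
            simp only [rsumFrom, csumFrom, moveOf, turnDelta, reduceIte, String.reduceEq, add_zero]
            have := ih a (b - val) h k hkh
            simp at this ⊢; rw [this]; ring_nf
          · by_cases hF : action = "F"
            · subst hF
              simp only [walkA, String.reduceEq, or_self, reduceIte]
              simp only [rsumFrom, csumFrom, moveOf, turnDelta, reduceIte, String.reduceEq, add_zero]
              rw [hmod] at hkh ⊢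
              have hh : h % 4 = (k : Int) := by omega
              rw [hh]
              interval_cases k
              · have := ih a (b + val) h 0 (by rw [hmod]; omega)
                simp [deqOf, fvec, move_boat] at this ⊢; rw [this]; ring_nf
              · have := ih (a - val) b h 1 (by rw [hmod]; omega)
                simp [deqOf, fvec, move_boat] at this ⊢; rw [this]; ring_nf
              · have := ih a (b - val) h 2 (by rw [hmod]; omega)
                simp [deqOf, fvec, move_boat] at this ⊢; rw [this]; ring_nf
              · have := ih (a + val) b h 3 (by rw [hmod]; omega)
                simp [deqOf, fvec, move_boat] at this ⊢; rw [this]; ring_nf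
            · by_cases hR : action = "R"
              · subst hR
                simp only [walkA, String.reduceEq, or_self, reduceIte]
                simp only [rsumFrom, csumFrom, moveOf, turnDelta, reduceIte, String.reduceEq]
                rw [dequeRotate_deqOf k _ hk4, neg_neg]
                have hkk : (k + (PySem.Int.floordiv val 90 % 4).toNat) % 4
                    = (PySem.Int.mod (h + PySem.Int.floordiv val 90) 4).toNat := by
                  rw [hmod] at hkh ⊢; omega
                rw [hkk]
                simpa using ih a b (h + PySem.Int.floordiv val 90) _ rfl
              · by_cases hL : action = "L"
                · subst hL
                  simp only [walkA, String.reduceEq, or_self, reduceIte]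
                  simp only [rsumFrom, csumFrom, moveOf, turnDelta, reduceIte, String.reduceEq]
                  rw [dequeRotate_deqOf k _ hk4]
                  have hkk : (k + (-PySem.Int.floordiv val 90 % 4).toNat) % 4
                      = (PySem.Int.mod (h + -PySem.Int.floordiv val 90) 4).toNat := by
                    rw [hmod] at hkh ⊢; omega
                  rw [hkk]
                  simpa using ih a b (h + -(PySem.Int.floordiv val 90)) _ rfl
                · simp only [walkA, hN, hS, hE, hW, hF, hR, hL, reduceIte]
                  simp only [rsumFrom, csumFrom, moveOf, turnDelta, hN, hS, hE, hW, hF, hR, hL,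
                    reduceIte, add_zero, zero_mul, zero_add]
                  simpa using ih a b h k hkh

-- ===== VERDICT (by name: the statement is the Claim_ definition above) =====
theorem walk_actions_spec : Claim_equal_walk_actions := by
  intro actions _
  unfold Spec_walk_actions walk_actions walk_actions_alt
  simp only [pipe_r, pipe_c]
  have := walkA_eq_sums actions 0 0 0 0 (by decide)
  simpa [deqOf] using this
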